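-- pv_equiv track=rewrite | github.com/gskuratowicz/prg-basics | test/complete programs/p7.py | f
-- ===== SOURCE A (Python) =====
-- def f(files):
--     split_files = []
--     for string in files:
--         name, extension = string.split(".")
--         split_files.append((extension, string))
--
--     split_files.sort()
--
--     result = []
--     for extension, filename in split_files:
--         result.append(filename)
--
--     return result
-- ===== SOURCE B (Python) =====
-- def f(files):
--     extensions = []
--     for string in files:
--         name, extension = string.split(".")
--         if extension not in extensions:
--             extensions.append(extension)
--     extensions.sort()
--     result = []
--     for extension in extensions:
--         group = [s for s in files if s.split(".")[1] == extension]
--         group.sort()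
--         result += group
--     return result
-- ===== Notes on version B (the rewrite author's own statement) =====
-- stated objective: alternative
-- what changed: Instead of one flat stable sort of (extension, filename) tuples, B collects the distinct extensions, sorts them, and for each extension in order sorts and appends that extension's group of filenames.
import Mathlib
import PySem

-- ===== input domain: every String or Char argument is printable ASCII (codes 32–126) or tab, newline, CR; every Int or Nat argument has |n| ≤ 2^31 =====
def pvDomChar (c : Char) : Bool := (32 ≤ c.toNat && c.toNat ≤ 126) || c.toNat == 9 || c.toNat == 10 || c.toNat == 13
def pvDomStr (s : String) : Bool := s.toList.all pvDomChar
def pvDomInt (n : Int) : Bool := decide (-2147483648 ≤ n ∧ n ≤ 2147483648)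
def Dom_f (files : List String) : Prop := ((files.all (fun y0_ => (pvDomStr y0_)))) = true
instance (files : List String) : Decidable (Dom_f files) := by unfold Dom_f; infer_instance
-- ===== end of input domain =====

-- B groups the filenames by extension instead of one flat sort of (extension, filename)
-- pairs: it collects the distinct extensions in order, sorts them, and emits each
-- extension's sorted group in turn (objective: alternative decomposition, same result).

-- ===== PORT A =====
-- 'name, extension = string.split(".")' — both ports read the parts via getD; Pre_f
-- restricts to inputs where the split has exactly 2 parts (elsewhere Python raises ValueError).
def splitParts (s : String) : List String := (PySem.Str.split? s ".").getD []
def extOf (s : String) : String := (splitParts s).getD 1 ""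

def f (files : List String) : List String :=
  -- split_files = [(extension, string) for string in files]  (name is bound and unused)
  let split_files : List (String × String) :=
    files.foldl (fun acc s => acc ++ [(extOf s, s)]) []
  -- split_files.sort()  — Python sorts the tuples lexicographically
  let split_files := PySem.List.sorted2 split_files Prod.fst Prod.snd false
  -- result = [filename for extension, filename in split_files]
  split_files.foldl (fun acc p => acc ++ [p.2]) []

-- ===== PORT B =====
def f_alt (files : List String) : List String :=
  -- collect the distinct extensions in first-occurrence order
  let extensions : PySem.Set String :=
    files.foldl (fun acc s => PySem.Set.add acc (extOf s)) []
  -- extensions.sort()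
  let extensions := PySem.List.sorted extensions (fun e => e) false
  -- for each extension: sorted group of its filenames, appended to result
  extensions.foldl
    (fun acc e =>
      acc ++ PySem.List.sorted (files.filter (fun s => extOf s == e)) (fun x => x) false)
    []

-- ===== PRECONDITION & SPEC =====
-- Pre_f: every filename splits on "." into exactly two parts; elsewhere the Python A
-- raises ValueError at the tuple unpacking (B raises at the same point).
def Pre_f (files : List String) : Prop :=
  ∀ s ∈ files, (splitParts s).length = 2
instance (files : List String) : Decidable (Pre_f files) := by unfold Pre_f; infer_instance

def pvWitness_f : List String := ["b.txt", "a.md", "a.txt"]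

def Spec_f (files : List String) (out : List String) : Prop := out = f_alt files
instance (files : List String) (out : List String) : Decidable (Spec_f files out) := by
  unfold Spec_f; infer_instance

-- ===== CLAIM (what is proved, stated in full; the proofs are below) =====
def Claim_equal_f : Prop := ∀ (files : List String), Dom_f files → Pre_f files → Spec_f files (f files)

-- ===== LEMMAS AND PROOFS =====

-- the tagged pair list A sorts
def pvPairs (files : List String) : List (String × String) := files.map (fun s => (extOf s, s))

-- A's tuple sort is the sort by the lexicographic key 'toLex'
theorem pvSorted2_eq_sorted_toLex (ps : List (String × String)) :
    PySem.List.sorted2 ps Prod.fst Prod.snd false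
      = PySem.List.sorted ps (fun p => toLex p) false := by
  have hb : (fun (a b : String × String) =>
        decide (a.1 < b.1) || (!decide (b.1 < a.1) && decide (a.2 < b.2)))
      = (fun (a b : String × String) => decide (toLex a < toLex b)) := by
    funext a b
    rw [Bool.eq_iff_iff]
    simp only [Bool.or_eq_true, Bool.and_eq_true, Bool.not_eq_true', decide_eq_true_eq,
      decide_eq_false_iff_not, Prod.Lex.toLex_lt_toLex]
    constructor
    · rintro (h | ⟨h1, h2⟩)
      · exact Or.inl h
      · rcases lt_trichotomy a.1 b.1 with h' | h' | h'
        · exact Or.inl h'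
        · exact Or.inr ⟨h', h2⟩
        · exact absurd h' h1
    · rintro (h | ⟨h1, h2⟩)
      · exact Or.inl h
      · exact Or.inr ⟨by rw [h1]; exact lt_irrefl _, h2⟩
  simp only [PySem.List.sorted2, PySem.List.sorted, if_neg (by decide : ¬(false = true)), hb]

theorem pvPairwise_sorted2 (ps : List (String × String)) :
    (PySem.List.sorted2 ps Prod.fst Prod.snd false).Pairwise
      (fun a b => toLex a ≤ toLex b) := by
  rw [pvSorted2_eq_sorted_toLex]
  exact PySem.List.sorted_pairwise ps (fun p => toLex p)

theorem pvPerm_sorted2 (ps : List (String × String)) :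
    (PySem.List.sorted2 ps Prod.fst Prod.snd false).Perm ps :=
  PySem.List.sorted2_perm ps Prod.fst Prod.snd false

-- a list is a permutation of its groups, taken over a nodup covering key list
theorem pvPerm_flatMap_filter {α β : Type} [DecidableEq β] (k : α → β) :
    ∀ (es : List β) (l : List α), es.Nodup → (∀ x ∈ l, k x ∈ es) →
      (es.flatMap (fun e => l.filter (fun x => k x == e))).Perm l := by
  intro es
  induction es with
  | nil =>
    intro l _ hcov
    have : l = [] := by
      cases l with
      | nil => rfl
      | cons a t => exact absurd (hcov a (by simp)) (by simp)
    simp [this]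
  | cons e es ih =>
    intro l hnd hcov
    rw [List.flatMap_cons]
    have hrest : (es.flatMap (fun e' => l.filter (fun x => k x == e')))
        = (es.flatMap (fun e' => (l.filter (fun x => !(k x == e))).filter (fun x => k x == e'))) := by
      apply List.flatMap_congr
      intro e' he'
      rw [List.filter_filter]
      apply List.filter_congr
      intro x hx
      have hne : e' ≠ e := fun h => (List.nodup_cons.mp hnd).1 (h ▸ he')
      by_cases h : k x = e'
      · simp [h, hne]
      · simp [h]
    rw [hrest]
    have hcov' : ∀ x ∈ l.filter (fun x => !(k x == e)), k x ∈ es := by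
      intro x hx
      rcases List.mem_filter.mp hx with ⟨hxl, hxe⟩
      rcases List.mem_cons.mp (hcov x hxl) with h | h
      · simp only [Bool.not_eq_true', beq_eq_false_iff_ne] at hxe; exact absurd h hxe
      · exact h
    exact (List.Perm.append_left _ (ih _ (List.nodup_cons.mp hnd).2 hcov')).trans
      (List.filter_append_perm _ l)

-- the filtered pair list of one extension, written as a tagged group of filenames
theorem pvFilter_pairs (files : List String) (e : String) :
    (pvPairs files).filter (fun p => p.1 == e)
      = (files.filter (fun s => extOf s == e)).map (fun s => (e, s)) := by
  unfold pvPairs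
  rw [List.filter_map]
  have : (files.filter (fun s => extOf s == e)).map ((fun s => (extOf s, s)))
      = (files.filter (fun s => extOf s == e)).map (fun s => (e, s)) := by
    apply List.map_congr_left
    intro s hs
    have := (List.mem_filter.mp hs).2
    simp only [beq_iff_eq] at this
    rw [this]
  rw [← this]
  rfl

-- B's output, tagged with its extensions: the list A's sort must equal
def pvTagged (files : List String) : List (String × String) :=
  (PySem.List.sorted (PySem.Set.ofList (files.map extOf)) (fun e => e) false).flatMap
    (fun e => ((PySem.List.sorted (files.filter (fun s => extOf s == e)) (fun x => x) false)).map
      (fun s => (e, s)))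

theorem pvTagged_perm (files : List String) : (pvTagged files).Perm (pvPairs files) := by
  unfold pvTagged
  have hstep : ∀ e, (((PySem.List.sorted (files.filter (fun s => extOf s == e)) (fun x => x) false)).map
      (fun s => (e, s))).Perm ((pvPairs files).filter (fun p => p.1 == e)) := by
    intro e
    rw [pvFilter_pairs]
    exact (PySem.List.sorted_perm _ _ _).map _
  refine (List.Perm.flatMap_left _ (fun e _ => hstep e)).trans ?_
  apply pvPerm_flatMap_filter (fun p : String × String => p.1)
  · exact ((PySem.List.sorted_perm _ _ _).nodup_iff).mpr (PySem.Set.nodup_ofList _)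
  · intro p hp
    unfold pvPairs at hp
    rcases List.mem_map.mp hp with ⟨s, hs, rfl⟩
    rw [PySem.List.mem_sorted, PySem.Set.mem_ofList]
    exact List.mem_map.mpr ⟨s, hs, rfl⟩

theorem pvTagged_pairwise (files : List String) :
    (pvTagged files).Pairwise (fun a b => toLex a ≤ toLex b) := by
  unfold pvTagged
  apply List.pairwise_flatMap.mpr
  refine ⟨?_, ?_⟩
  · intro e _
    apply List.pairwise_map.mpr
    apply List.Pairwise.imp ?_ (PySem.List.sorted_pairwise (files.filter (fun s => extOf s == e)) (fun x => x))
    intro a b hab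
    rw [Prod.Lex.toLex_le_toLex]
    exact Or.inr ⟨rfl, hab⟩
  · apply List.Pairwise.imp ?_ (PySem.List.sorted_ofList_pairwise_lt (files.map extOf))
    intro e e' hee' a ha b hb
    rcases List.mem_map.mp ha with ⟨s, _, rfl⟩
    rcases List.mem_map.mp hb with ⟨t, _, rfl⟩
    rw [Prod.Lex.toLex_le_toLex]
    exact Or.inl hee'

theorem pvSorted_pairs_eq_tagged (files : List String) :
    PySem.List.sorted2 (pvPairs files) Prod.fst Prod.snd false = pvTagged files := by
  apply PySem.List.eq_of_perm_of_pairwise_le_of_injective (fun p : String × String => toLex p)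
  · intro a b h; exact h
  · exact (pvPerm_sorted2 _).trans (pvTagged_perm files).symm
  · exact pvPairwise_sorted2 _
  · exact pvTagged_pairwise files

-- the Set.add loop over files builds Set.ofList of the mapped extensions
theorem pvExts_eq_ofList (files : List String) :
    files.foldl (fun acc s => PySem.Set.add acc (extOf s)) ([] : PySem.Set String)
      = PySem.Set.ofList (files.map extOf) := by
  rw [PySem.Set.ofList_eq_foldl, List.foldl_map]

-- ===== VERDICT (by name: the statement is the Claim_ definition above) =====
theorem f_spec : Claim_equal_f := by
  intro files _ _
  unfold Spec_f f f_alt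
  simp only [PySem.List.foldl_append_singleton_eq_map, PySem.List.foldl_append_eq_flatMap,
    List.nil_append, pvExts_eq_ofList]
  rw [show files.map (fun s => (extOf s, s)) = pvPairs files from rfl,
    pvSorted_pairs_eq_tagged]
  unfold pvTagged
  rw [List.map_flatMap]
  congr 1
  funext e
  rw [List.map_map]
  simp
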